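-- pv_equiv track=rewrite | github.com/karthikv792/LLMs-Planning | llm_planning_analysis/pddlgenerators/sokoban/build-problems.py | split_descriptions
-- ===== SOURCE A (Python) =====
-- def split_into_blocks(lines):
--     block = []
--     for line in lines:
--         line = line.partition(";")[0].rstrip()
--         if line:
--             block.append(line)
--         elif block:
--             yield block
--             block = []
--     if block:
--         yield block
--
-- def split_descriptions(lines):
--     comments = []
--     maze = []
--     for block in split_into_blocks(lines):
--         for line in block:
--             if line.startswith(('"', "'")):
--                 comments.append(line)
--                 assert not maze
--             else:
--                 maze.append(line)
--         if maze:
--             yield comments, maze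
--             maze = []
--             comments = []
-- ===== SOURCE B (Python) =====
-- def split_descriptions(lines):
--     # one flat state machine over the lines instead of nested generators
--     comments = []
--     maze = []
--     for raw in lines:
--         line = raw.partition(";")[0].rstrip()
--         if line:
--             if line.startswith(('"', "'")):
--                 assert not maze
--                 comments.append(line)
--             else:
--                 maze.append(line)
--         elif maze:
--             yield comments, maze
--             comments = []
--             maze = []
--     if maze:
--         yield comments, maze
-- ===== Notes on version B (the rewrite author's own statement) =====
-- stated objective: simpler
-- what changed: Replaced the two nested generators (block splitter feeding a block classifier) with a single flat pass over the lines keeping (comments, maze) state and flushing at blank lines and at end of input.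
import Mathlib
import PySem

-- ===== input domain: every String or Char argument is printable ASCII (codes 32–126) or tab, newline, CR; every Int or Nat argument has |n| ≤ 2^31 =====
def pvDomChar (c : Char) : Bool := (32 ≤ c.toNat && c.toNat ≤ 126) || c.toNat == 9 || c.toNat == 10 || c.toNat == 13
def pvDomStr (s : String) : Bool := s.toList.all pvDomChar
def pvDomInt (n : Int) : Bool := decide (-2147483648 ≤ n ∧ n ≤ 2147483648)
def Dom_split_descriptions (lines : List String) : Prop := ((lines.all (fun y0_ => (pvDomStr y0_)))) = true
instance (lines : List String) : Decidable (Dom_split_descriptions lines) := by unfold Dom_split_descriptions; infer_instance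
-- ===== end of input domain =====

-- B replaces A's two nested generators by one flat state machine over the lines (objective: simpler).

-- line.partition(";")[0].rstrip() — partition(";")[0] ported by hand as takeWhile (≠ ';'),
-- exact because the separator is a single character; rstrip via PySem.
def pvClean (s : String) : String :=
  PySem.Str.rstrip (String.ofList (s.toList.takeWhile (fun c => c ≠ ';')))

-- line.startswith(('"', "'")) : a tuple argument is an OR of the two prefixes
def pvIsQuote (s : String) : Bool :=
  PySem.Str.startswith s "\"" || PySem.Str.startswith s "'"

-- ===== PORT A =====
-- generator split_into_blocks, as a recursion over the lines with the running block as state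
def pvSibAux : List String → List String → List (List String)
  | [], block => if block ≠ [] then [block] else []
  | raw :: rest, block =>
      let line := pvClean raw
      if line ≠ "" then pvSibAux rest (block ++ [line])
      else if block ≠ [] then block :: pvSibAux rest []
      else pvSibAux rest block

-- the inner `for line in block` loop of split_descriptions (the assert carries no value; Pre_ excludes the inputs where it fires)
def pvProcBlock (cm : List String × List String) (block : List String) : List String × List String :=
  block.foldl (fun cm line =>
    if pvIsQuote line then (cm.1 ++ [line], cm.2) else (cm.1, cm.2 ++ [line])) cm

-- the outer `for block in split_into_blocks(lines)` loop, yields collected into a list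
def pvRunBlocks : List (List String) → List String → List String → List (List String × List String)
  | [], _, _ => []
  | b :: bs, c, m =>
      let p := pvProcBlock (c, m) b
      if p.2 ≠ [] then (p.1, p.2) :: pvRunBlocks bs [] []
      else pvRunBlocks bs p.1 p.2

def split_descriptions (lines : List String) : List (List String × List String) :=
  pvRunBlocks (pvSibAux lines []) [] []

-- ===== PORT B =====
-- Source B: one pass, state = (comments, maze); blank line flushes iff maze is non-empty; final flush
def pvRunB : List String → List String → List String → List (List String × List String)
  | [], c, m => if m ≠ [] then [(c, m)] else []
  | raw :: rest, c, m =>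
      let line := pvClean raw
      if line ≠ "" then
        if pvIsQuote line then pvRunB rest (c ++ [line]) m
        else pvRunB rest c (m ++ [line])
      else if m ≠ [] then (c, m) :: pvRunB rest [] []
      else pvRunB rest c m

def split_descriptions_alt (lines : List String) : List (List String × List String) :=
  pvRunB lines [] []

-- ===== PRECONDITION & SPEC =====
-- Pre_ excludes exactly the inputs on which Python A (and B) raise AssertionError:
-- a quote-starting cleaned line preceded, with no blank cleaned line in between, by a
-- non-empty non-quote cleaned line (a comment after maze content inside one block).
def Pre_split_descriptions (lines : List String) : Prop :=
  ∀ i j : Fin lines.length, i < j →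
    pvClean lines[i] ≠ "" → pvIsQuote (pvClean lines[i]) = false →
    pvIsQuote (pvClean lines[j]) = true →
    ∃ k : Fin lines.length, i < k ∧ k < j ∧ pvClean lines[k] = ""
instance (lines : List String) : Decidable (Pre_split_descriptions lines) := by
  unfold Pre_split_descriptions; infer_instance

def pvWitness_split_descriptions : List String := ["'a maze'", "#x#;note", "", "#y#"]

def Spec_split_descriptions (lines : List String) (out : List (List String × List String)) : Prop := out = split_descriptions_alt lines
instance (lines : List String) (out : List (List String × List String)) : Decidable (Spec_split_descriptions lines out) := by unfold Spec_split_descriptions; infer_instance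

-- ===== CLAIM (what is proved, stated in full; the proofs are below) =====
def Claim_equal_split_descriptions : Prop := ∀ (lines : List String), Dom_split_descriptions lines → Pre_split_descriptions lines → Spec_split_descriptions lines (split_descriptions lines)

-- ===== LEMMAS AND PROOFS =====

lemma pvProcBlock_nil (cm : List String × List String) : pvProcBlock cm [] = cm := rfl

lemma pvRunB_cons (raw : String) (rest : List String) (c m : List String) :
    pvRunB (raw :: rest) c m =
      (let line := pvClean raw
       if line ≠ "" then
         if pvIsQuote line then pvRunB rest (c ++ [line]) m
         else pvRunB rest c (m ++ [line])
       else if m ≠ [] then (c, m) :: pvRunB rest [] []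
       else pvRunB rest c m) := rfl

lemma pvProcBlock_append (cm : List String × List String) (b : List String) (l : String) :
    pvProcBlock cm (b ++ [l]) =
      (if pvIsQuote l then ((pvProcBlock cm b).1 ++ [l], (pvProcBlock cm b).2)
       else ((pvProcBlock cm b).1, (pvProcBlock cm b).2 ++ [l])) := by
  simp [pvProcBlock, List.foldl_append]

lemma pvKey : ∀ (lines block c : List String),
    pvRunBlocks (pvSibAux lines block) c [] =
      pvRunB lines (pvProcBlock (c, []) block).1 (pvProcBlock (c, []) block).2 := by
  intro lines
  induction lines with
  | nil =>
      intro block c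
      by_cases hb : block = []
      · subst hb; simp [pvSibAux, pvRunBlocks, pvRunB, pvProcBlock]
      · simp only [pvSibAux, hb, if_pos, ne_eq, not_false_eq_true]
        by_cases hm : (pvProcBlock (c, []) block).2 = [] <;>
          simp [pvRunBlocks, pvRunB, hm]
  | cons raw rest ih =>
      intro block c
      by_cases hl : pvClean raw = ""
      · by_cases hb : block = []
        · subst hb
          simp only [pvSibAux, hl]
          simpa [pvRunB, hl, pvProcBlock] using ih [] c
        · simp only [pvSibAux, hl, hb, ne_eq, not_true_eq_false, if_false,
            not_false_eq_true, if_true]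
          by_cases hm : (pvProcBlock (c, []) block).2 = []
          · rw [show pvRunBlocks (block :: pvSibAux rest []) c [] =
                pvRunBlocks (pvSibAux rest []) (pvProcBlock (c, []) block).1
                  (pvProcBlock (c, []) block).2 by
              simp [pvRunBlocks, hm]]
            rw [hm, ih [] (pvProcBlock (c, []) block).1, pvRunB_cons]
            simp [hl, pvProcBlock_nil]
          · rw [show pvRunBlocks (block :: pvSibAux rest []) c [] =
                ((pvProcBlock (c, []) block).1, (pvProcBlock (c, []) block).2) ::
                  pvRunBlocks (pvSibAux rest []) [] [] by
              simp [pvRunBlocks, hm]]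
            rw [ih [] [], pvRunB_cons]
            simp [hl, hm, pvProcBlock_nil]
      · simp only [pvSibAux, hl, ne_eq, not_false_eq_true, if_true]
        rw [ih (block ++ [pvClean raw]) c]
        by_cases hq : pvIsQuote (pvClean raw) = true <;>
          simp [pvRunB, hl, hq, pvProcBlock_append]

-- ===== VERDICT (by name: the statement is the Claim_ definition above) =====
theorem split_descriptions_spec : Claim_equal_split_descriptions := by
  intro lines _ _
  show split_descriptions lines = split_descriptions_alt lines
  have h := pvKey lines [] []
  simpa [split_descriptions, split_descriptions_alt, pvProcBlock] using h
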